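-- pv_equiv track=rewrite | github.com/yb-claw/hermes-agent | gateway/platforms/yuanbao.py | _split_into_atoms
-- ===== SOURCE A (Python) =====
-- def _split_into_atoms(text: str) -> list[str]:
--     """
--     Split text into a list of "atomic blocks", each being an indivisible logical unit:
--
--     - Code block (fence): from opening ``` to closing ``` (including fence lines)
--     - Table: consecutive |...| lines forming a whole segment
--     - Normal paragraph: plain text segments separated by blank lines
--
--     Blank lines serve as separators and are not included in any atomic block.
--
--     Args:
--         text: Markdown text to split
--
--     Returns:
--         List of atomic block strings (all non-empty)
--     """
--     lines = text.split('\n')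
--     atoms: list[str] = []
--
--     current_lines: list[str] = []
--     in_fence = False
--
--     def _is_table_line(line: str) -> bool:
--         stripped = line.strip()
--         return stripped.startswith('|') and stripped.endswith('|')
--
--     def _flush_current() -> None:
--         if current_lines:
--             atom = '\n'.join(current_lines)
--             if atom.strip():
--                 atoms.append(atom)
--             current_lines.clear()
--
--     for line in lines:
--         if in_fence:
--             current_lines.append(line)
--             if line.startswith('```') and len(current_lines) > 1:
--                 in_fence = False
--                 _flush_current()
--         elif line.startswith('```'):
--             _flush_current()
--             in_fence = True
--             current_lines.append(line)
--         elif _is_table_line(line):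
--             if current_lines and not _is_table_line(current_lines[-1]):
--                 _flush_current()
--             current_lines.append(line)
--         elif line.strip() == '':
--             _flush_current()
--         else:
--             if current_lines and _is_table_line(current_lines[-1]):
--                 _flush_current()
--             current_lines.append(line)
--
--     _flush_current()
--
--     return atoms
-- ===== SOURCE B (Python) =====
-- def _split_into_atoms(text: str) -> list[str]:
--     """Index-driven block scanner: dispatch on the current line and consume a
--     whole atom (fence / table run / paragraph run) with an inner loop."""
--     lines = text.split('\n')
--     n = len(lines)
--     atoms: list[str] = []
--
--     def _is_table_line(line: str) -> bool:
--         s = line.strip()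
--         return s.startswith('|') and s.endswith('|')
--
--     def _emit(block: list[str]) -> None:
--         atom = '\n'.join(block)
--         if atom.strip():
--             atoms.append(atom)
--
--     i = 0
--     while i < n:
--         line = lines[i]
--         if line.startswith('```'):
--             j = i + 1
--             while j < n and not lines[j].startswith('```'):
--                 j += 1
--             if j < n:
--                 j += 1  # include the closing fence line
--             _emit(lines[i:j])
--             i = j
--         elif _is_table_line(line):
--             j = i + 1
--             while j < n and _is_table_line(lines[j]):
--                 j += 1
--             _emit(lines[i:j])
--             i = j
--         elif line.strip() == '':
--             i += 1
--         else:
--             j = i + 1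
--             while j < n and not (lines[j].startswith('```') or _is_table_line(lines[j]) or lines[j].strip() == ''):
--                 j += 1
--             _emit(lines[i:j])
--             i = j
--     return atoms
-- ===== Notes on version B (the rewrite author's own statement) =====
-- stated objective: alternative
-- what changed: Replaces A's flat one-line-at-a-time state machine (persistent in_fence flag, current_lines buffer flushed on transitions) by an index-driven scanner that dispatches on the current line and consumes a whole block - fence to its closing line, maximal table run, maximal paragraph run - with a dedicated inner loop per block kind.
import Mathlib
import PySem

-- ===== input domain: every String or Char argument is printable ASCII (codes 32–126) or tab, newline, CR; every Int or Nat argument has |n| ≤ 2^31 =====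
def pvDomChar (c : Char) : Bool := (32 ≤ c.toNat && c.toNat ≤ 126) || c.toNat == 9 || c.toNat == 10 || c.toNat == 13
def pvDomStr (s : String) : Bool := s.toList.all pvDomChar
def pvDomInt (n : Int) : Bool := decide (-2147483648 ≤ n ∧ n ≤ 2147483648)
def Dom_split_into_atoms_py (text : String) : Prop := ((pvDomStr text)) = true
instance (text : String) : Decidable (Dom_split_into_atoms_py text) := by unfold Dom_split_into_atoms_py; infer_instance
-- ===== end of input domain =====

-- B replaces A's flat one-line-at-a-time state machine (persistent in_fence flag,
-- flush-on-transition) by an index-driven scanner that dispatches on the current line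
-- and consumes a whole block (fence / table run / paragraph run) with an inner loop;
-- same cost, different decomposition (objective: alternative).

-- ===== PORT A =====
-- shared helpers: the line tests both Pythons perform verbatim
-- (_is_table_line, line.startswith('```'), line.strip() == '')
def pvIsFence (l : String) : Bool := PySem.Str.startswith l "```"

def pvIsBlank (l : String) : Bool := PySem.Str.strip l == ""

def pvIsTable (l : String) : Bool :=
  PySem.Str.startswith (PySem.Str.strip l) "|" && PySem.Str.endswith (PySem.Str.strip l) "|"

-- _flush_current: append the joined block if its strip is truthy
def pvFlush (atoms cur : List String) : List String :=
  if cur.isEmpty then atoms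
  else
    let atom := PySem.Str.join "\n" cur
    if PySem.Str.strip atom = "" then atoms else atoms ++ [atom]

-- the for-loop, one line per step, state (atoms, current_lines, in_fence)
def pvLoopA (atoms cur : List String) (fence : Bool) : List String → List String
  | [] => pvFlush atoms cur
  | l :: rest =>
    if fence then
      let cur' := cur ++ [l]
      if pvIsFence l && decide (cur'.length > 1) then
        pvLoopA (pvFlush atoms cur') [] false rest
      else
        pvLoopA atoms cur' true rest
    else if pvIsFence l then
      pvLoopA (pvFlush atoms cur) [l] true rest
    else if pvIsTable l then
      if (match cur.getLast? with | some last => !pvIsTable last | none => false) then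
        pvLoopA (pvFlush atoms cur) [l] false rest
      else
        pvLoopA atoms (cur ++ [l]) false rest
    else if pvIsBlank l then
      pvLoopA (pvFlush atoms cur) [] false rest
    else
      if (match cur.getLast? with | some last => pvIsTable last | none => false) then
        pvLoopA (pvFlush atoms cur) [l] false rest
      else
        pvLoopA atoms (cur ++ [l]) false rest

def split_into_atoms_py (text : String) : List String :=
  pvLoopA [] [] false (((PySem.Str.split? text "\n").getD []))

-- ===== PORT B =====
-- inner while loop: consume lines up to and including the first closing fence line
def pvTakeFence : List String → List String × List String
  | [] => ([], [])
  | l :: rest =>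
    if pvIsFence l then ([l], rest)
    else
      let p := pvTakeFence rest
      (l :: p.1, p.2)

-- inner while loop: maximal run of table lines
def pvTakeTable : List String → List String × List String
  | [] => ([], [])
  | l :: rest =>
    if pvIsTable l then
      let p := pvTakeTable rest
      (l :: p.1, p.2)
    else ([], l :: rest)

-- paragraph-line test: not a fence start, not a table line, not blank
def pvIsPara (l : String) : Bool :=
  !pvIsFence l && !pvIsTable l && !pvIsBlank l

-- inner while loop: maximal run of paragraph lines
def pvTakePara : List String → List String × List String
  | [] => ([], [])
  | l :: rest =>
    if pvIsPara l then
      let p := pvTakePara rest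
      (l :: p.1, p.2)
    else ([], l :: rest)

-- _emit: prepend the joined block if its strip is truthy
def pvEmit (block : List String) (tail : List String) : List String :=
  let atom := PySem.Str.join "\n" block
  if PySem.Str.strip atom = "" then tail else atom :: tail

theorem pvTakeFence_len_le : ∀ r : List String, (pvTakeFence r).2.length ≤ r.length := by
  intro r; induction r with
  | nil => simp [pvTakeFence]
  | cons l rest ih => simp only [pvTakeFence]; split <;> simp <;> omega

theorem pvTakeTable_len_le : ∀ r : List String, (pvTakeTable r).2.length ≤ r.length := by
  intro r; induction r with
  | nil => simp [pvTakeTable]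
  | cons l rest ih => simp only [pvTakeTable]; split <;> simp <;> omega

theorem pvTakePara_len_le : ∀ r : List String, (pvTakePara r).2.length ≤ r.length := by
  intro r; induction r with
  | nil => simp [pvTakePara]
  | cons l rest ih => simp only [pvTakePara]; split <;> simp <;> omega

-- the outer while loop of B
def pvGoB : List String → List String
  | [] => []
  | l :: rest =>
    if pvIsFence l then
      let p := pvTakeFence rest
      pvEmit (l :: p.1) (pvGoB p.2)
    else if pvIsTable l then
      let p := pvTakeTable rest
      pvEmit (l :: p.1) (pvGoB p.2)
    else if pvIsBlank l then
      pvGoB rest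
    else
      let p := pvTakePara rest
      pvEmit (l :: p.1) (pvGoB p.2)
termination_by lines => lines.length
decreasing_by
  · exact Nat.lt_succ_of_le (pvTakeFence_len_le rest)
  · exact Nat.lt_succ_of_le (pvTakeTable_len_le rest)
  · exact Nat.lt_succ_of_le (Nat.le_refl _)
  · exact Nat.lt_succ_of_le (pvTakePara_len_le rest)

def split_into_atoms_py_alt (text : String) : List String :=
  pvGoB (((PySem.Str.split? text "\n").getD []))

-- ===== PRECONDITION & SPEC =====
def Spec_split_into_atoms_py (text : String) (out : List String) : Prop := out = split_into_atoms_py_alt text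
instance (text : String) (out : List String) : Decidable (Spec_split_into_atoms_py text out) := by unfold Spec_split_into_atoms_py; infer_instance

-- ===== CLAIM (what is proved, stated in full; the proofs are below) =====
def Claim_equal_split_into_atoms_py : Prop := ∀ (text : String), Dom_split_into_atoms_py text → Spec_split_into_atoms_py text (split_into_atoms_py text)

-- ===== LEMMAS AND PROOFS =====

theorem pvFlush_nil (atoms : List String) : pvFlush atoms [] = atoms := by simp [pvFlush]

theorem strip_head_backtick (t : List Char) :
    PySem.Chars.startswith (PySem.Chars.strip ('`'::t)) ['|'] = false := by
  have hl : PySem.Chars.lstrip ('`'::t) = '`'::t := by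
    have hsp : PySem.Chars.isspace '`' = false := by decide
    simp [PySem.Chars.lstrip, hsp]
  have hsuf : PySem.Chars.rstrip ('`'::t) <+: ('`'::t) := by
    have h1 : List.dropWhile PySem.Chars.isspace ('`'::t).reverse <:+ ('`'::t).reverse :=
      List.dropWhile_suffix _
    have := h1.reverse
    simpa [PySem.Chars.rstrip] using this
  unfold PySem.Chars.strip
  rw [hl]
  rcases hsuf with ⟨s, hs⟩
  rcases hr : PySem.Chars.rstrip ('`'::t) with _ | ⟨c, cs⟩
  · decide
  · rw [hr] at hs
    have hc : c = '`' := by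
      have := congrArg (List.head? ·) hs
      simpa using this
    subst hc
    simp [PySem.Chars.startswith, List.isPrefixOf]

-- a line starting with ``` is never a table line (strip keeps the leading backtick)
theorem fence_not_table (l : String) (h : pvIsFence l = true) :
    pvIsTable l = false := by
  unfold pvIsFence at h
  simp only [PySem.Str.startswith, PySem.Chars.startswith] at h
  rw [List.isPrefixOf_iff_prefix] at h
  have h3 : "```".toList = ['`','`','`'] := by decide
  rw [h3] at h
  rcases h with ⟨t, ht⟩
  unfold pvIsTable
  have hs : PySem.Str.startswith (PySem.Str.strip l) "|" = false := by
    simp only [PySem.Str.startswith, PySem.Str.strip]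
    have htl : l.toList = '`' :: ('`' :: '`' :: t) := by rw [← ht]; rfl
    rw [htl]
    have hround : (String.ofList (PySem.Chars.strip ('`' :: ('`'::'`'::t)))).toList
        = PySem.Chars.strip ('`' :: ('`'::'`'::t)) := by simp
    rw [hround]
    have := strip_head_backtick ('`'::'`'::t)
    simpa using this
  rw [hs]
  rfl

theorem loopA_fence : ∀ (rest : List String) (atoms cur : List String), cur ≠ [] →
    pvLoopA atoms cur true rest
      = pvLoopA (pvFlush atoms (cur ++ (pvTakeFence rest).1)) [] false (pvTakeFence rest).2 := by
  intro rest
  induction rest with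
  | nil => intro atoms cur _; simp [pvLoopA, pvTakeFence, pvFlush_nil]
  | cons l rest ih =>
    intro atoms cur hc
    by_cases hf : pvIsFence l = true
    · have hlen : (cur ++ [l]).length > 1 := by
        rcases cur with _ | ⟨a, b⟩
        · exact absurd rfl hc
        · simp
      simp [pvLoopA, pvTakeFence, hf]
      intro h
      exact absurd h hc
    · have hf' : pvIsFence l = false := by simpa using hf
      have hne : cur ++ [l] ≠ [] := by simp
      simp only [pvLoopA, pvTakeFence, hf', Bool.false_and, Bool.false_eq_true]
      rw [ih atoms (cur ++ [l]) hne]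
      simp

theorem loopA_table : ∀ (rest : List String) (atoms cur : List String) (last : String),
    cur.getLast? = some last → pvIsTable last = true →
    pvLoopA atoms cur false rest
      = pvLoopA (pvFlush atoms (cur ++ (pvTakeTable rest).1)) [] false (pvTakeTable rest).2 := by
  intro rest
  induction rest with
  | nil => intro atoms cur last _ _; simp [pvLoopA, pvTakeTable, pvFlush_nil]
  | cons l rest ih =>
    intro atoms cur last hlast htab
    by_cases ht : pvIsTable l = true
    · have hf : pvIsFence l = false := by
        by_cases h : pvIsFence l = true
        · rw [fence_not_table l h] at ht; cases ht
        · simpa using h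
      have hstep : pvLoopA atoms cur false (l :: rest) = pvLoopA atoms (cur ++ [l]) false rest := by
        simp [pvLoopA, hf, ht, hlast, htab]
      rw [hstep, ih atoms (cur ++ [l]) l (by simp) ht]
      simp [pvTakeTable, ht]
    · have ht' : pvIsTable l = false := by simpa using ht
      have htt : pvTakeTable (l :: rest) = ([], l :: rest) := by
        simp [pvTakeTable, ht']
      rw [htt]
      simp only [List.append_nil]
      by_cases hf : pvIsFence l = true
      · simp [pvLoopA, hf, pvFlush_nil]
      · have hf' : pvIsFence l = false := by simpa using hf
        by_cases hb : pvIsBlank l = true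
        · simp [pvLoopA, hf', ht', hb, pvFlush_nil]
        · have hb' : pvIsBlank l = false := by simpa using hb
          simp [pvLoopA, hf', ht', hb', hlast, htab]

theorem loopA_para : ∀ (rest : List String) (atoms cur : List String) (last : String),
    cur.getLast? = some last → pvIsTable last = false →
    pvLoopA atoms cur false rest
      = pvLoopA (pvFlush atoms (cur ++ (pvTakePara rest).1)) [] false (pvTakePara rest).2 := by
  intro rest
  induction rest with
  | nil => intro atoms cur last _ _; simp [pvLoopA, pvTakePara, pvFlush_nil]
  | cons l rest ih =>
    intro atoms cur last hlast htab
    by_cases hp : pvIsPara l = true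
    · have hf : pvIsFence l = false := by
        revert hp; unfold pvIsPara; cases pvIsFence l <;> simp
      have ht : pvIsTable l = false := by
        revert hp; unfold pvIsPara; cases pvIsTable l <;> simp
      have hb : pvIsBlank l = false := by
        revert hp; unfold pvIsPara; cases pvIsBlank l <;> simp
      have hstep : pvLoopA atoms cur false (l :: rest) = pvLoopA atoms (cur ++ [l]) false rest := by
        simp [pvLoopA, hf, ht, hb, hlast, htab]
      rw [hstep, ih atoms (cur ++ [l]) l (by simp) ht]
      simp [pvTakePara, hp]
    · have hp' : pvIsPara l = false := by simpa using hp
      have htt : pvTakePara (l :: rest) = ([], l :: rest) := by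
        simp [pvTakePara, hp']
      rw [htt]
      simp only [List.append_nil]
      by_cases hf : pvIsFence l = true
      · simp [pvLoopA, hf, pvFlush_nil]
      · have hf' : pvIsFence l = false := by simpa using hf
        by_cases ht : pvIsTable l = true
        · simp [pvLoopA, hf', ht, hlast, htab]
        · have ht' : pvIsTable l = false := by simpa using ht
          have hb : pvIsBlank l = true := by
            revert hp'; unfold pvIsPara; rw [hf', ht']; cases pvIsBlank l <;> simp
          simp [pvLoopA, hf', ht', hb, pvFlush_nil]

theorem flush_emit (atoms c X : List String) (hc : c ≠ []) :
    pvFlush atoms c ++ X = atoms ++ pvEmit c X := by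
  unfold pvFlush pvEmit
  rw [if_neg (by simpa using hc)]
  by_cases h : PySem.Str.strip (PySem.Str.join "\n" c) = "" <;> simp [h]

theorem loopA_goB : ∀ (n : ℕ) (lines atoms : List String), lines.length ≤ n →
    pvLoopA atoms [] false lines = atoms ++ pvGoB lines := by
  intro n
  induction n with
  | zero =>
    intro lines atoms hn
    have hnil : lines = [] := by
      cases lines with
      | nil => rfl
      | cons a b => simp at hn
    subst hnil
    simp [pvLoopA, pvGoB, pvFlush_nil]
  | succ n ih =>
    intro lines atoms hn
    cases lines with
    | nil => simp [pvLoopA, pvGoB, pvFlush_nil]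
    | cons l rest =>
      have hrest : rest.length ≤ n := by simpa using hn
      by_cases hf : pvIsFence l = true
      · have h1 : pvLoopA atoms [] false (l :: rest) = pvLoopA atoms [l] true rest := by
          simp [pvLoopA, hf, pvFlush_nil]
        rw [h1, loopA_fence rest atoms [l] (by simp),
          ih _ _ (le_trans (pvTakeFence_len_le rest) hrest),
          flush_emit _ _ _ (by simp)]
        conv_rhs => rw [pvGoB]
        simp [hf]
      · have hf' : pvIsFence l = false := by simpa using hf
        by_cases ht : pvIsTable l = true
        · have h1 : pvLoopA atoms [] false (l :: rest) = pvLoopA atoms [l] false rest := by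
            simp [pvLoopA, hf', ht]
          rw [h1, loopA_table rest atoms [l] l (by simp) ht,
            ih _ _ (le_trans (pvTakeTable_len_le rest) hrest),
            flush_emit _ _ _ (by simp)]
          conv_rhs => rw [pvGoB]
          simp [hf', ht]
        · have ht' : pvIsTable l = false := by simpa using ht
          by_cases hb : pvIsBlank l = true
          · have h1 : pvLoopA atoms [] false (l :: rest) = pvLoopA atoms [] false rest := by
              simp [pvLoopA, hf', ht', hb, pvFlush_nil]
            rw [h1, ih _ _ hrest]
            conv_rhs => rw [pvGoB]
            simp [hf', ht', hb]
          · have hb' : pvIsBlank l = false := by simpa using hb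
            have h1 : pvLoopA atoms [] false (l :: rest) = pvLoopA atoms [l] false rest := by
              simp [pvLoopA, hf', ht', hb']
            rw [h1, loopA_para rest atoms [l] l (by simp) ht',
              ih _ _ (le_trans (pvTakePara_len_le rest) hrest),
              flush_emit _ _ _ (by simp)]
            conv_rhs => rw [pvGoB]
            simp [hf', ht', hb']

-- ===== VERDICT (by name: the statement is the Claim_ definition above) =====
theorem split_into_atoms_py_spec : Claim_equal_split_into_atoms_py := by
  intro text _
  unfold Spec_split_into_atoms_py split_into_atoms_py split_into_atoms_py_alt
  simpa using loopA_goB (((PySem.Str.split? text "\n").getD [])).length _ [] (Nat.le_refl _)
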